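-- pv_equiv track=rewrite | github.com/Muzque/Leetcode | AlgoExpert/strings/underscorifySubstring.py | underscorifySubstring
-- ===== SOURCE A (Python) =====
-- def cut_recursive_string(i, string, substring, ret):
--     span = len(substring)
--     if i+span > len(string) or span == 0:
--         return ret
--     cut = string[i:i+span]
--     if cut == substring:
--         ret += substring
--         return cut_recursive_string(i+span, string, substring, ret)
--     return ret
--
-- def find_recursive_string(i, string, substring, ret):
--     updated = cut_recursive_string(i, string, substring, ret)
--     if len(updated) == len(ret):
--         return updated
--     return cut_recursive_string(i+len(updated), string, substring[1:], updated)
--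
-- def underscorifySubstring(string, substring):
--     ret = ''
--     i = 0
--     while i < len(string):
--         r = find_recursive_string(i, string, substring, '')
--         if r:
--             ret += f'_{r}_'
--             i += len(r)
--         else:
--             ret += string[i]
--             i += 1
--     return ret
-- ===== SOURCE B (Python) =====
-- def underscorifySubstring(string, substring):
--     # single iterative pass: count back-to-back full copies, then back-to-back
--     # copies of substring[1:], and wrap the matched slice in underscores
--     out = []
--     n, m = len(string), len(substring)
--     i = 0
--     while i < n:
--         j = i
--         k = 0
--         if m > 0:
--             while string[j:j + m] == substring:
--                 j += m
--                 k += 1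
--         if k > 0:
--             tail = substring[1:]
--             m2 = m - 1
--             if m2 > 0:
--                 while string[j:j + m2] == tail:
--                     j += m2
--             out.append('_' + string[i:j] + '_')
--             i = j
--         else:
--             out.append(string[i])
--             i += 1
--     return ''.join(out)
-- ===== Notes on version B (the rewrite author's own statement) =====
-- stated objective: simpler
-- what changed: Replaces the two recursive helper functions and string-accumulator concatenation with a single iterative function: inner loops only advance indices and count matches, and the matched block is taken as one slice string[i:j].
import Mathlib
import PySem

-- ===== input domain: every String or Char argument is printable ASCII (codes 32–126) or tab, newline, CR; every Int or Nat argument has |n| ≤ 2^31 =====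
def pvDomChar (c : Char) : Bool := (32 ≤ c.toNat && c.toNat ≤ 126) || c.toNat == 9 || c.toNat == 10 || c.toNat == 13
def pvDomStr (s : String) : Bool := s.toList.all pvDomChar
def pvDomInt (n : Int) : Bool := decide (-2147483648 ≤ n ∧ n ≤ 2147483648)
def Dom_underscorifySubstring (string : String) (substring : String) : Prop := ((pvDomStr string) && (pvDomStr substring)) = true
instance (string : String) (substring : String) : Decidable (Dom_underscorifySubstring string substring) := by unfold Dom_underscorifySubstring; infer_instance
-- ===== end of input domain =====

-- B replaces A's two recursive string-accumulating helpers by one iterative pass that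
-- counts matches with index-advancing inner loops and slices the matched block once (simpler).
-- Both ports carry an explicit fuel argument (always called with enough fuel) purely to make
-- the Python while/recursion structurally total in Lean; it changes no computed value.

-- ===== PORT A =====
-- cut_recursive_string: appends `substring` while consecutive copies start at i.
def cutRecA : Nat → Nat → List Char → List Char → List Char → List Char
  | 0, _, _, _, ret => ret
  | fuel + 1, i, s, sub, ret =>
    if i + sub.length > s.length ∨ sub.length = 0 then ret
    else if (s.drop i).take sub.length = sub then
      cutRecA fuel (i + sub.length) s sub (ret ++ sub)
    else ret

-- find_recursive_string (the fuel s.length + 1 always exceeds the recursion depth)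
def findRecA (i : Nat) (s : List Char) (sub : List Char) (ret : List Char) : List Char :=
  let updated := cutRecA (s.length + 1) i s sub ret
  if updated.length = ret.length then updated
  else cutRecA (s.length + 1) (i + updated.length) s (sub.drop 1) updated

-- the while loop of underscorifySubstring
def mainA : Nat → Nat → List Char → List Char → List Char → List Char
  | 0, _, _, _, ret => ret
  | fuel + 1, i, s, sub, ret =>
    if h : i < s.length then
      let r := findRecA i s sub []
      if r ≠ [] then mainA fuel (i + r.length) s sub (ret ++ ('_' :: r ++ ['_']))
      else mainA fuel (i + 1) s sub (ret ++ [s[i]])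
    else ret

def underscorifySubstring (string : String) (substring : String) : String :=
  String.mk (mainA (string.toList.length + 1) 0 string.toList substring.toList [])

-- ===== PORT B =====
-- B's first inner while; the Python guard `m > 0` outside the loop is merged into the
-- loop condition (`sub ≠ []`), which never changes across iterations, so the loop runs
-- exactly the same iterations. Returns (final j, match count k).
def fullLoopB : Nat → List Char → List Char → Nat → Nat → Nat × Nat
  | 0, _, _, j, k => (j, k)
  | fuel + 1, s, sub, j, k =>
    if sub ≠ [] ∧ (s.drop j).take sub.length = sub then
      fullLoopB fuel s sub (j + sub.length) (k + 1)
    else (j, k)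

-- B's second inner while over `tail = substring[1:]` (guard `m2 > 0` likewise merged)
def tailLoopB : Nat → List Char → List Char → Nat → Nat
  | 0, _, _, j => j
  | fuel + 1, s, t, j =>
    if t ≠ [] ∧ (s.drop j).take t.length = t then
      tailLoopB fuel s t (j + t.length)
    else j

-- B's outer while loop: on a match, append the slice s[i:j2] wrapped in underscores
def mainB : Nat → Nat → List Char → List Char → List Char → List Char
  | 0, _, _, _, acc => acc
  | fuel + 1, i, s, sub, acc =>
    if h : i < s.length then
      let p := fullLoopB (s.length + 1) s sub i 0
      if 0 < p.2 then
        let j2 := tailLoopB (s.length + 1) s (sub.drop 1) p.1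
        mainB fuel j2 s sub (acc ++ ('_' :: ((s.drop i).take (j2 - i)) ++ ['_']))
      else mainB fuel (i + 1) s sub (acc ++ [s[i]])
    else acc

def underscorifySubstring_alt (string : String) (substring : String) : String :=
  String.mk (mainB (string.toList.length + 1) 0 string.toList substring.toList [])

-- ===== PRECONDITION & SPEC =====
def Spec_underscorifySubstring (string : String) (substring : String) (out : String) : Prop := out = underscorifySubstring_alt string substring
instance (string : String) (substring : String) (out : String) : Decidable (Spec_underscorifySubstring string substring out) := by unfold Spec_underscorifySubstring; infer_instance

-- ===== CLAIM (what is proved, stated in full; the proofs are below) =====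
def Claim_equal_underscorifySubstring : Prop := ∀ (string : String) (substring : String), Dom_underscorifySubstring string substring → Spec_underscorifySubstring string substring (underscorifySubstring string substring)

-- ===== LEMMAS AND PROOFS =====

-- cutRecA's recursion condition is equivalent to the loop condition of fullLoopB
theorem cutRecA_cond (s sub : List Char) (i : Nat) :
    (¬ (i + sub.length > s.length ∨ sub.length = 0) ∧ (s.drop i).take sub.length = sub)
      ↔ (sub ≠ [] ∧ (s.drop i).take sub.length = sub) := by
  constructor
  · rintro ⟨h1, h2⟩
    push_neg at h1
    exact ⟨List.ne_nil_of_length_pos (by omega), h2⟩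
  · rintro ⟨h1, h2⟩
    have h3 : 0 < sub.length := List.length_pos_iff.mpr h1
    have h4 := congrArg List.length h2
    simp at h4
    exact ⟨by push_neg; omega, h2⟩

theorem cutRecA_step (n i : Nat) (s sub ret : List Char)
    (hc : sub ≠ [] ∧ (s.drop i).take sub.length = sub) :
    cutRecA (n + 1) i s sub ret = cutRecA n (i + sub.length) s sub (ret ++ sub) := by
  have h1 := (cutRecA_cond s sub i).mpr hc
  rw [cutRecA, if_neg h1.1, if_pos h1.2]

theorem cutRecA_stop (n i : Nat) (s sub ret : List Char)
    (hc : ¬ (sub ≠ [] ∧ (s.drop i).take sub.length = sub)) :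
    cutRecA (n + 1) i s sub ret = ret := by
  rw [cutRecA]
  split_ifs with g1 g2
  · rfl
  · exact absurd ((cutRecA_cond s sub i).mp ⟨g1, g2⟩) hc
  · rfl

theorem fullLoopB_step (n : Nat) (s sub : List Char) (j k : Nat)
    (hc : sub ≠ [] ∧ (s.drop j).take sub.length = sub) :
    fullLoopB (n + 1) s sub j k = fullLoopB n s sub (j + sub.length) (k + 1) := by
  rw [fullLoopB, if_pos hc]

theorem fullLoopB_stop (n : Nat) (s sub : List Char) (j k : Nat)
    (hc : ¬ (sub ≠ [] ∧ (s.drop j).take sub.length = sub)) :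
    fullLoopB (n + 1) s sub j k = (j, k) := by
  rw [fullLoopB, if_neg hc]

theorem tailLoopB_step (n : Nat) (s t : List Char) (j : Nat)
    (hc : t ≠ [] ∧ (s.drop j).take t.length = t) :
    tailLoopB (n + 1) s t j = tailLoopB n s t (j + t.length) := by
  rw [tailLoopB, if_pos hc]

theorem tailLoopB_stop (n : Nat) (s t : List Char) (j : Nat)
    (hc : ¬ (t ≠ [] ∧ (s.drop j).take t.length = t)) :
    tailLoopB (n + 1) s t j = j := by
  rw [tailLoopB, if_neg hc]

theorem fullLoopB_snd_ge (s sub : List Char) : ∀ n j k, k ≤ (fullLoopB n s sub j k).2 := by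
  intro n
  induction n with
  | zero => intro j k; rw [fullLoopB]
  | succ n ih =>
    intro j k
    by_cases hc : sub ≠ [] ∧ (s.drop j).take sub.length = sub
    · rw [fullLoopB_step n s sub j k hc]
      have := ih (j + sub.length) (k + 1)
      omega
    · rw [fullLoopB_stop n s sub j k hc]

-- accumulator lemma for A's cut_recursive_string
theorem cutRecA_acc (s sub : List Char) : ∀ n i ret, cutRecA n i s sub ret = ret ++ cutRecA n i s sub [] := by
  intro n
  induction n with
  | zero => intro i ret; rw [cutRecA, cutRecA]; simp
  | succ n ih =>
    intro i ret
    by_cases hc : sub ≠ [] ∧ (s.drop i).take sub.length = sub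
    · rw [cutRecA_step n i s sub ret hc, cutRecA_step n i s sub [] hc,
          ih (i + sub.length) (ret ++ sub), ih (i + sub.length) ([] ++ sub)]
      simp
    · rw [cutRecA_stop n i s sub ret hc, cutRecA_stop n i s sub [] hc]
      simp

-- the matched text is literally the slice of s at i of its own length
theorem cutRecA_slice (s sub : List Char) : ∀ n i,
    cutRecA n i s sub [] = (s.drop i).take (cutRecA n i s sub []).length := by
  intro n
  induction n with
  | zero => intro i; rw [cutRecA]; simp
  | succ n ih =>
    intro i
    by_cases hc : sub ≠ [] ∧ (s.drop i).take sub.length = sub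
    · rw [cutRecA_step n i s sub [] hc, cutRecA_acc s sub n (i + sub.length) ([] ++ sub)]
      have ihr := ih (i + sub.length)
      simp only [List.nil_append]
      conv_lhs => rw [ihr]
      rw [List.length_append, List.take_add, List.drop_drop, hc.2]
    · rw [cutRecA_stop n i s sub [] hc]
      simp

-- fullLoopB's final index and count, in terms of cutRecA (same fuel on both sides)
theorem fullLoopB_cut (s sub : List Char) : ∀ n i k,
    (fullLoopB n s sub i k).1 = i + (cutRecA n i s sub []).length ∧
    ((fullLoopB n s sub i k).2 = k ↔ cutRecA n i s sub [] = []) := by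
  intro n
  induction n with
  | zero => intro i k; rw [fullLoopB, cutRecA]; simp
  | succ n ih =>
    intro i k
    by_cases hc : sub ≠ [] ∧ (s.drop i).take sub.length = sub
    · rw [fullLoopB_step n s sub i k hc, cutRecA_step n i s sub [] hc,
          cutRecA_acc s sub n (i + sub.length) ([] ++ sub)]
      obtain ⟨ih1, ih2⟩ := ih (i + sub.length) (k + 1)
      constructor
      · rw [ih1]; simp; omega
      · have hge := fullLoopB_snd_ge s sub n (i + sub.length) (k + 1)
        constructor
        · intro he; omega
        · intro he
          simp at he
          exact absurd he.1 hc.1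
    · rw [fullLoopB_stop n s sub i k hc, cutRecA_stop n i s sub [] hc]
      simp

theorem tailLoopB_cut (s t : List Char) : ∀ n i,
    tailLoopB n s t i = i + (cutRecA n i s t []).length := by
  intro n
  induction n with
  | zero => intro i; rw [tailLoopB, cutRecA]; simp
  | succ n ih =>
    intro i
    by_cases hc : t ≠ [] ∧ (s.drop i).take t.length = t
    · rw [tailLoopB_step n s t i hc, cutRecA_step n i s t [] hc,
          cutRecA_acc s t n (i + t.length) ([] ++ t), ih (i + t.length)]
      simp; omega
    · rw [tailLoopB_stop n s t i hc, cutRecA_stop n i s t [] hc]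
      simp

theorem mainA_eq_mainB (s sub : List Char) : ∀ n i acc,
    mainA n i s sub acc = mainB n i s sub acc := by
  intro n
  induction n with
  | zero => intro i acc; rw [mainA, mainB]
  | succ n ih =>
    intro i acc
    rw [mainA, mainB]
    by_cases hi : i < s.length
    · rw [dif_pos hi, dif_pos hi]
      have hcut := fullLoopB_cut s sub (s.length + 1) i 0
      by_cases hu : cutRecA (s.length + 1) i s sub [] = []
      · -- no full match at i: both copy one character
        have hr : findRecA i s sub [] = [] := by
          simp [findRecA, hu]
        have hk : ¬ 0 < (fullLoopB (s.length + 1) s sub i 0).2 := by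
          have := hcut.2.mpr hu
          omega
        simp only [hr, hk]
        simp
        exact ih (i + 1) (acc ++ [s[i]])
      · -- a full match: A wraps r = u ++ v, B wraps the slice of the same length
        have hulen : 0 < (cutRecA (s.length + 1) i s sub []).length := List.length_pos_iff.mpr hu
        have hr : findRecA i s sub [] =
            cutRecA (s.length + 1) i s sub [] ++
              cutRecA (s.length + 1) (i + (cutRecA (s.length + 1) i s sub []).length) s (sub.drop 1) [] := by
          simp only [findRecA, List.length_nil]
          rw [if_neg (by omega)]
          exact cutRecA_acc s (sub.drop 1) (s.length + 1)
            (i + (cutRecA (s.length + 1) i s sub []).length) (cutRecA (s.length + 1) i s sub [])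
        have hk : 0 < (fullLoopB (s.length + 1) s sub i 0).2 := by
          rcases Nat.eq_zero_or_pos (fullLoopB (s.length + 1) s sub i 0).2 with h0 | h0
          · exact absurd (hcut.2.mp h0) hu
          · exact h0
        have hj2 : tailLoopB (s.length + 1) s (sub.drop 1) (fullLoopB (s.length + 1) s sub i 0).1 =
            i + (cutRecA (s.length + 1) i s sub []).length +
              (cutRecA (s.length + 1) (i + (cutRecA (s.length + 1) i s sub []).length) s (sub.drop 1) []).length := by
          rw [hcut.1]
          exact tailLoopB_cut s (sub.drop 1) (s.length + 1) (i + (cutRecA (s.length + 1) i s sub []).length)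
        have hslice : (s.drop i).take
            (tailLoopB (s.length + 1) s (sub.drop 1) (fullLoopB (s.length + 1) s sub i 0).1 - i) = findRecA i s sub [] := by
          rw [hj2, hr]
          have e1 := cutRecA_slice s sub (s.length + 1) i
          have e2 := cutRecA_slice s (sub.drop 1) (s.length + 1) (i + (cutRecA (s.length + 1) i s sub []).length)
          have : i + (cutRecA (s.length + 1) i s sub []).length +
              (cutRecA (s.length + 1) (i + (cutRecA (s.length + 1) i s sub []).length) s (sub.drop 1) []).length - i
              = (cutRecA (s.length + 1) i s sub []).length +
                (cutRecA (s.length + 1) (i + (cutRecA (s.length + 1) i s sub []).length) s (sub.drop 1) []).length := by omega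
          rw [this, List.take_add, List.drop_drop, ← e1, ← e2]
        have hrne : findRecA i s sub [] ≠ [] := by
          rw [hr]; simp [hu]
        have hlen : tailLoopB (s.length + 1) s (sub.drop 1) (fullLoopB (s.length + 1) s sub i 0).1 =
            i + (findRecA i s sub []).length := by
          rw [hj2, hr, List.length_append]
          omega
        rw [if_pos hrne, if_pos hk]
        show mainA n (i + (findRecA i s sub []).length) s sub (acc ++ ('_' :: findRecA i s sub [] ++ ['_'])) =
          mainB n (tailLoopB (s.length + 1) s (List.drop 1 sub) (fullLoopB (s.length + 1) s sub i 0).1) s sub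
            (acc ++ ('_' :: List.take (tailLoopB (s.length + 1) s (List.drop 1 sub) (fullLoopB (s.length + 1) s sub i 0).1 - i) (List.drop i s) ++ ['_']))
        rw [hslice, hlen]
        exact ih (i + (findRecA i s sub []).length) _
    · rw [dif_neg hi, dif_neg hi]

-- ===== VERDICT (by name: the statement is the Claim_ definition above) =====
theorem underscorifySubstring_spec : Claim_equal_underscorifySubstring := by
  intro string substring _
  unfold Spec_underscorifySubstring underscorifySubstring underscorifySubstring_alt
  exact congrArg String.mk (mainA_eq_mainB string.toList substring.toList (string.toList.length + 1) 0 [])
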